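-- pv_equiv track=rewrite | github.com/twidtwid/propertymanagement | scripts/extract_property_data.py | categorize_pdf
-- ===== SOURCE A (Python) =====
-- def categorize_pdf(filepath: str) -> str:
--     """Categorize a PDF based on its path and name."""
--     filepath_lower = filepath.lower()
--     if "insurance" in filepath_lower:
--         return "insurance"
--     elif "tax" in filepath_lower:
--         return "tax"
--     elif any(x in filepath_lower for x in ["hvac", "elevator", "maintenance", "contract", "service"]):
--         return "maintenance"
--     elif any(x in filepath_lower for x in ["utility", "electric", "gas", "water"]):
--         return "utility"
--     elif "bill" in filepath_lower:
--         return "bill"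
--     elif "condo" in filepath_lower or "hoa" in filepath_lower:
--         return "hoa"
--     else:
--         return "other"
-- ===== SOURCE B (Python) =====
-- _KEYWORD_CATEGORY = {
--     "insurance": "insurance",
--     "tax": "tax",
--     "hvac": "maintenance",
--     "elevator": "maintenance",
--     "maintenance": "maintenance",
--     "contract": "maintenance",
--     "service": "maintenance",
--     "utility": "utility",
--     "electric": "utility",
--     "gas": "utility",
--     "water": "utility",
--     "bill": "bill",
--     "condo": "hoa",
--     "hoa": "hoa",
-- }
-- _PRIORITY = ["insurance", "tax", "maintenance", "utility", "bill", "hoa", "other"]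
--
-- def categorize_pdf(filepath: str) -> str:
--     """Categorize a PDF based on its path and name."""
--     filepath_lower = filepath.lower()
--     matched = {cat for kw, cat in _KEYWORD_CATEGORY.items() if kw in filepath_lower}
--     matched.add("other")
--     return min(matched, key=_PRIORITY.index)
-- ===== Notes on version B (the rewrite author's own statement) =====
-- stated objective: alternative
-- what changed: Replaced the ordered if/elif chain with a flat keyword-to-category map: collect the set of all matched categories in one comprehension, then select the highest-priority one via min with a priority-index key.
import Mathlib
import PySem

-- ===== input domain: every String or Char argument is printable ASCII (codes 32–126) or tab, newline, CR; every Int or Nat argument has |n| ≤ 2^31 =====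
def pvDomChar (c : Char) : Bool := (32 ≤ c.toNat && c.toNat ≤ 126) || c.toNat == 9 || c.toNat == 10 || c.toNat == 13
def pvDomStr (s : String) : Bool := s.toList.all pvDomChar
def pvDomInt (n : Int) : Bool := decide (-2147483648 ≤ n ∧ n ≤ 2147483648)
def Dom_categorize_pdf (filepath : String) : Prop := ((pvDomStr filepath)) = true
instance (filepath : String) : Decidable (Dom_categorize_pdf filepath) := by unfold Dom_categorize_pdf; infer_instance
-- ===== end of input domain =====

-- B replaces the if/elif chain by a flat keyword->category map: collect the set of matched categories, then pick the minimum under a priority ranking (alternative decomposition).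


-- ===== PORT A =====
def categorize_pdf (filepath : String) : String :=
  let filepath_lower := PySem.Str.lower filepath
  if PySem.Str.isIn "insurance" filepath_lower then "insurance"
  else if PySem.Str.isIn "tax" filepath_lower then "tax"
  else if ["hvac", "elevator", "maintenance", "contract", "service"].any (fun x => PySem.Str.isIn x filepath_lower) then "maintenance"
  else if ["utility", "electric", "gas", "water"].any (fun x => PySem.Str.isIn x filepath_lower) then "utility"
  else if PySem.Str.isIn "bill" filepath_lower then "bill"
  else if PySem.Str.isIn "condo" filepath_lower || PySem.Str.isIn "hoa" filepath_lower then "hoa"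
  else "other"

-- ===== PORT B =====
-- flat keyword -> category map (dict in insertion order) and the priority ranking
def keywordCategory : List (String × String) :=
  [ ("insurance", "insurance"),
    ("tax", "tax"),
    ("hvac", "maintenance"),
    ("elevator", "maintenance"),
    ("maintenance", "maintenance"),
    ("contract", "maintenance"),
    ("service", "maintenance"),
    ("utility", "utility"),
    ("electric", "utility"),
    ("gas", "utility"),
    ("water", "utility"),
    ("bill", "bill"),
    ("condo", "hoa"),
    ("hoa", "hoa") ]

def priorityList : List String :=
  ["insurance", "tax", "maintenance", "utility", "bill", "hoa", "other"]

-- min(matched, key=_PRIORITY.index): the key is injective on the distinct categories,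
-- so the minimum is independent of the set's iteration order (exact per PySem.Set rules).
def categorize_pdf_alt (filepath : String) : String :=
  let filepath_lower := PySem.Str.lower filepath
  let matched : PySem.Set String :=
    PySem.Set.ofList ((keywordCategory.filter (fun p => PySem.Str.isIn p.1 filepath_lower)).map (fun p => p.2))
  let matched := PySem.Set.add matched "other"
  (PySem.List.min? matched (fun c => (PySem.List.index? priorityList c).getD priorityList.length)).getD "other"

-- ===== PRECONDITION & SPEC =====
def Spec_categorize_pdf (filepath : String) (out : String) : Prop := out = categorize_pdf_alt filepath
instance (filepath : String) (out : String) : Decidable (Spec_categorize_pdf filepath out) := by unfold Spec_categorize_pdf; infer_instance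

-- ===== CLAIM (what is proved, stated in full; the proofs are below) =====
def Claim_equal_categorize_pdf : Prop := ∀ (filepath : String), Dom_categorize_pdf filepath → Spec_categorize_pdf filepath (categorize_pdf filepath)

-- ===== LEMMAS AND PROOFS =====

-- proof-only helper: filtering by a per-element boolean mask
def bFilter {α : Type} : List Bool → List α → List α
  | true :: bs, x :: xs => x :: bFilter bs xs
  | false :: bs, _ :: xs => bFilter bs xs
  | _, _ => []

theorem filter_eq_bFilter {α : Type} (p : α → Bool) (xs : List α) :
    xs.filter p = bFilter (xs.map p) xs := by
  induction xs with
  | nil => rfl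
  | cons a l ih => cases h : p a <;> simp [h, bFilter, ih]

-- both programs depend on the input only through the 14 membership tests
set_option maxHeartbeats 1000000 in
theorem chain_eq_min : ∀ (b1 b2 b3 b4 b5 b6 b7 b8 b9 b10 b11 b12 b13 b14 : Bool),
    (if b1 then "insurance"
     else if b2 then "tax"
     else if b3 || (b4 || (b5 || (b6 || (b7 || false)))) then "maintenance"
     else if b8 || (b9 || (b10 || (b11 || false))) then "utility"
     else if b12 then "bill"
     else if b13 || b14 then "hoa"
     else "other") =
    (PySem.List.min?
        (PySem.Set.add
          (PySem.Set.ofList ((bFilter [b1,b2,b3,b4,b5,b6,b7,b8,b9,b10,b11,b12,b13,b14]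
            keywordCategory).map (fun p => p.2)))
          "other")
        (fun c => (PySem.List.index? priorityList c).getD priorityList.length)).getD "other" := by
  decide

-- ===== VERDICT (by name: the statement is the Claim_ definition above) =====
theorem categorize_pdf_spec : Claim_equal_categorize_pdf := by
  intro filepath _
  simp only [Spec_categorize_pdf, categorize_pdf, categorize_pdf_alt]
  rw [filter_eq_bFilter]
  simp only [keywordCategory, List.map_cons, List.map_nil, List.any_cons, List.any_nil]
  exact chain_eq_min _ _ _ _ _ _ _ _ _ _ _ _ _ _
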